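-- pv_equiv track=rewrite | github.com/LovecraftianHorror/subwinder | subwinder/auth.py | _default_ranking
-- ===== SOURCE A (Python) =====
-- def _default_ranking(results, query_index, exclude_bad=True, sub_exts=None):
--     best_result = None
--     max_downloads = None
--     DOWN_KEY = "SubDownloadsCnt"
--
--     # Force list of `sub_exts` to be lowercase
--     if sub_exts is not None:
--         sub_exts = [sub_ext.lower() for sub_ext in sub_exts]
--
--     for result in results:
--         # Skip if someone listed sub as bad and `exclude_bad` is `True`
--         if exclude_bad and result["SubBad"] != "0":
--             continue
--
--         # Skip incorrect `sub_ext`s if provided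
--         if sub_exts is not None:
--             if result["SubFormat"].lower() not in sub_exts:
--                 continue
--
--         if max_downloads is None or int(result[DOWN_KEY]) > max_downloads:
--             best_result = result
--             max_downloads = int(result[DOWN_KEY])
--
--     return best_result
-- ===== SOURCE B (Python) =====
-- def _default_ranking(results, query_index, exclude_bad=True, sub_exts=None):
--     exts = None if sub_exts is None else [e.lower() for e in sub_exts]
--     filtered = [r for r in results
--                 if not (exclude_bad and r["SubBad"] != "0")
--                 and (exts is None or r["SubFormat"].lower() in exts)]
--     if not filtered:
--         return None
--     # stage 2: the maximum download count, as a plain int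
--     m = max(int(r["SubDownloadsCnt"]) for r in filtered)
--     # stage 3: the first record attaining that count
--     for r in filtered:
--         if int(r["SubDownloadsCnt"]) == m:
--             return r
-- ===== Notes on version B (the rewrite author's own statement) =====
-- stated objective: alternative
-- what changed: Replaces A's single-pass running argmax (best_result/max_downloads accumulators updated inside the filter loop) by a staged threshold algorithm: filter once, compute the maximum download count as a bare integer with max() over the counts, then linearly scan for the first record whose count equals that threshold.
import Mathlib
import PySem

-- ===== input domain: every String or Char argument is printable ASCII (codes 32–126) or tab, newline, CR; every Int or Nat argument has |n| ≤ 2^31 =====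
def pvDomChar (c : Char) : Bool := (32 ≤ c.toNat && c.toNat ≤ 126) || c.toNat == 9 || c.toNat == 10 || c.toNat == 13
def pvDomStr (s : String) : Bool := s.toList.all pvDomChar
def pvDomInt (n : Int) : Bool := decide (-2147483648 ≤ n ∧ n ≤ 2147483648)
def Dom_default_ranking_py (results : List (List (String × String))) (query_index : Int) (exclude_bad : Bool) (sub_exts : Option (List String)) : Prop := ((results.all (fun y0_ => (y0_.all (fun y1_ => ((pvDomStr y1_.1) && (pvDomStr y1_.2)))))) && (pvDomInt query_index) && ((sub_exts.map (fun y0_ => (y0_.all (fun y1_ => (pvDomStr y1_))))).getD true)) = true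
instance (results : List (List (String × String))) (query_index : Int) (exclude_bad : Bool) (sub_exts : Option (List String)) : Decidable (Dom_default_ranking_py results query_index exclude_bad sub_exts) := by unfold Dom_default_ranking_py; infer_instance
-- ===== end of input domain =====

-- B replaces A's single-pass running argmax by a staged threshold algorithm: filter, then the
-- maximum download count as a bare integer, then the first record attaining it. Objective:
-- alternative. Pre_ excludes exactly the inputs where A raises (KeyError / ValueError).

-- shared dict-access / int() helpers; Pre_ guarantees the key is present and int() parses,
-- so the `getD` defaults are never reached on admitted inputs (exact on Pre_).
def pvGet (r : List (String × String)) (k : String) : String :=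
  ((PySem.Dict.mk r).get? k).getD ""
def pvKey (r : List (String × String)) : Int :=
  (PySem.Int.ofStr? (pvGet r "SubDownloadsCnt")).getD 0

-- ===== PORT A =====
-- one loop step of A's for-loop: state = (best_result, max_downloads)
def pvStepA (exclude_bad : Bool) (exts : Option (List String))
    (st : Option (List (String × String)) × Option Int) (result : List (String × String)) :
    Option (List (String × String)) × Option Int :=
  if exclude_bad && !(pvGet result "SubBad" == "0") then st
  else if (match exts with
           | some es => !(es.contains (PySem.Str.lower (pvGet result "SubFormat")))
           | none => false) then st
  else match st.2 with
    | none => (some result, some (pvKey result))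
    | some m => if m < pvKey result then (some result, some (pvKey result)) else st

def default_ranking_py (results : List (List (String × String))) (query_index : Int) (exclude_bad : Bool) (sub_exts : Option (List String)) : Option (List (String × String)) :=
  -- force list of `sub_exts` to be lowercase
  let exts : Option (List String) :=
    match sub_exts with
    | some l => some (l.map PySem.Str.lower)
    | none => none
  (results.foldl (pvStepA exclude_bad exts) (none, none)).1

-- ===== PORT B =====
-- the comprehension's filter condition
def pvPasses (exclude_bad : Bool) (exts : Option (List String)) (r : List (String × String)) : Bool :=
  !(exclude_bad && !(pvGet r "SubBad" == "0")) &&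
  (match exts with
   | none => true
   | some es => es.contains (PySem.Str.lower (pvGet r "SubFormat")))

def default_ranking_py_alt (results : List (List (String × String))) (query_index : Int) (exclude_bad : Bool) (sub_exts : Option (List String)) : Option (List (String × String)) :=
  let exts : Option (List String) := sub_exts.map (fun l => l.map PySem.Str.lower)
  let filtered := results.filter (pvPasses exclude_bad exts)
  match filtered with
  | [] => none
  | h :: t =>
    -- stage 2: m = max(int(r["SubDownloadsCnt"]) for r in filtered)
    let m : Int := t.foldl (fun a r => max a (pvKey r)) (pvKey h)
    -- stage 3: first record attaining the threshold
    (h :: t).find? (fun r => pvKey r == m)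

-- ===== PRECONDITION & SPEC =====
-- Pre_ admits exactly the inputs on which A returns: for each result, the keys A actually reads
-- ("SubBad" when exclude_bad; "SubFormat" when the bad-filter passes and sub_exts is given;
-- "SubDownloadsCnt", parsing as int(), when both filters pass) must be present.
def Pre_default_ranking_py (results : List (List (String × String))) (query_index : Int) (exclude_bad : Bool) (sub_exts : Option (List String)) : Prop :=
  (results.all (fun r =>
    let bad := (PySem.Dict.mk r).get? "SubBad"
    let fmt := (PySem.Dict.mk r).get? "SubFormat"
    let dlOK := match (PySem.Dict.mk r).get? "SubDownloadsCnt" with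
                | some s => (PySem.Int.ofStr? s).isSome
                | none => false
    (!exclude_bad || bad.isSome) &&
    (if exclude_bad && !(bad == some "0") then true
     else match sub_exts with
       | none => dlOK
       | some es =>
         fmt.isSome &&
         (if (es.map PySem.Str.lower).contains (PySem.Str.lower (fmt.getD "")) then dlOK
          else true)))) = true
instance (results : List (List (String × String))) (query_index : Int) (exclude_bad : Bool) (sub_exts : Option (List String)) : Decidable (Pre_default_ranking_py results query_index exclude_bad sub_exts) := by unfold Pre_default_ranking_py; infer_instance

def pvWitness_default_ranking_py : (List (List (String × String))) × Int × Bool × Option (List String) :=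
  ([[("SubBad", "0"), ("SubFormat", "srt"), ("SubDownloadsCnt", "12")],
    [("SubBad", "1"), ("SubFormat", "sub"), ("SubDownloadsCnt", "99")]],
   0, true, some ["SRT"])

def Spec_default_ranking_py (results : List (List (String × String))) (query_index : Int) (exclude_bad : Bool) (sub_exts : Option (List String)) (out : Option (List (String × String))) : Prop := out = default_ranking_py_alt results query_index exclude_bad sub_exts
instance (results : List (List (String × String))) (query_index : Int) (exclude_bad : Bool) (sub_exts : Option (List String)) (out : Option (List (String × String))) : Decidable (Spec_default_ranking_py results query_index exclude_bad sub_exts out) := by unfold Spec_default_ranking_py; infer_instance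

-- ===== CLAIM (what is proved, stated in full; the proofs are below) =====
def Claim_equal_default_ranking_py : Prop := ∀ (results : List (List (String × String))) (query_index : Int) (exclude_bad : Bool) (sub_exts : Option (List String)), Dom_default_ranking_py results query_index exclude_bad sub_exts → Pre_default_ranking_py results query_index exclude_bad sub_exts → Spec_default_ranking_py results query_index exclude_bad sub_exts (default_ranking_py results query_index exclude_bad sub_exts)

-- ===== LEMMAS AND PROOFS =====

-- A's loop restricted to the records that pass both filters (proof-only abstraction)
def pvStepB (acc : Option (List (String × String))) (x : List (String × String)) :
    Option (List (String × String)) :=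
  match acc with
  | none => some x
  | some m => if pvKey m < pvKey x then some x else some m

lemma stepA_pass (eb : Bool) (exts : Option (List String)) (b : Option (List (String × String)))
    (r : List (String × String)) (hP : pvPasses eb exts r = true) :
    pvStepA eb exts (b, b.map pvKey) r = (pvStepB b r, (pvStepB b r).map pvKey) := by
  unfold pvPasses at hP
  unfold pvStepA pvStepB
  split_ifs with h1 h2
  · exfalso; cases exts <;> simp_all
  · exfalso; cases exts <;> simp_all
  · cases b <;> simp <;> split <;> simp

lemma stepA_skip (eb : Bool) (exts : Option (List String))
    (st : Option (List (String × String)) × Option Int)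
    (r : List (String × String)) (hP : pvPasses eb exts r = false) :
    pvStepA eb exts st r = st := by
  unfold pvPasses at hP
  unfold pvStepA
  split_ifs with h1 h2
  · rfl
  · rfl
  · exfalso; cases exts <;> simp_all

lemma loop_inv (eb : Bool) (exts : Option (List String)) :
    ∀ (rs : List (List (String × String))) (b : Option (List (String × String))),
      rs.foldl (pvStepA eb exts) (b, b.map pvKey)
        = ((rs.filter (pvPasses eb exts)).foldl pvStepB b,
           ((rs.filter (pvPasses eb exts)).foldl pvStepB b).map pvKey) := by
  intro rs
  induction rs with
  | nil => intro b; simp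
  | cons r t ih =>
    intro b
    by_cases hP : pvPasses eb exts r = true
    · simp only [List.foldl_cons, List.filter_cons, hP, if_pos]
      rw [stepA_pass eb exts b r hP]
      exact ih (pvStepB b r)
    · have hP' : pvPasses eb exts r = false := by simpa using hP
      simp only [List.foldl_cons, List.filter_cons, hP', Bool.false_eq_true]
      rw [stepA_skip eb exts _ r hP']
      exact ih b

lemma maxfold_le (t : List (List (String × String))) :
    ∀ (k : Int), k ≤ t.foldl (fun a r => max a (pvKey r)) k := by
  induction t with
  | nil => intro k; simp
  | cons y s ihs =>
    intro k
    simp only [List.foldl_cons]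
    exact (le_max_left k (pvKey y)).trans (ihs (max k (pvKey y)))

-- the running argmax over a nonempty list is the first element whose key attains the max key
lemma foldB_find (t : List (List (String × String))) :
    ∀ b, t.foldl pvStepB (some b)
      = (b :: t).find? (fun r => pvKey r == t.foldl (fun a r => max a (pvKey r)) (pvKey b)) := by
  induction t with
  | nil => intro b; simp [List.find?]
  | cons x t ih =>
    intro b
    have hkey : pvKey (if pvKey b < pvKey x then x else b) = max (pvKey b) (pvKey x) := by
      split <;> omega
    have hM : t.foldl (fun a r => max a (pvKey r)) (pvKey (if pvKey b < pvKey x then x else b))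
        = t.foldl (fun a r => max a (pvKey r)) (max (pvKey b) (pvKey x)) := by rw [hkey]
    have hle := maxfold_le t
    simp only [List.foldl_cons, pvStepB]
    rw [← apply_ite some, ih (if pvKey b < pvKey x then x else b), hM]
    set M := t.foldl (fun a r => max a (pvKey r)) (max (pvKey b) (pvKey x)) with hMdef
    have hbM : pvKey b ≤ M := le_trans (le_max_left _ _) (hle _)
    have hxM : pvKey x ≤ M := le_trans (le_max_right _ _) (hle _)
    by_cases hbx : pvKey b < pvKey x
    · -- accumulator became x; b can never attain M since pvKey b < pvKey x ≤ M
      have hbne : pvKey b ≠ M := by omega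
      rw [if_pos hbx]
      conv_rhs => rw [List.find?_cons_of_neg (by simp [hbne])]
    · -- accumulator stays b
      simp only [if_neg hbx]
      by_cases hbeq : pvKey b = M
      · rw [List.find?_cons_of_pos (by simp [hbeq]),
            List.find?_cons_of_pos (by simp [hbeq])]
      · have hxle : pvKey x ≤ pvKey b := by omega
        have hxne : pvKey x ≠ M := by omega
        rw [List.find?_cons_of_neg (by simp [hbeq]),
            List.find?_cons_of_neg (by simp [hbeq]),
            List.find?_cons_of_neg (by simp [hxne])]

lemma foldB_alt (l : List (List (String × String))) :
    l.foldl pvStepB none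
      = match l with
        | [] => none
        | h :: t => (h :: t).find? (fun r => pvKey r == t.foldl (fun a r => max a (pvKey r)) (pvKey h)) := by
  cases l with
  | nil => rfl
  | cons h t => simpa [pvStepB] using foldB_find t h

-- ===== VERDICT (by name: the statement is the Claim_ definition above) =====
theorem default_ranking_py_spec : Claim_equal_default_ranking_py := by
  intro results query_index exclude_bad sub_exts _hDom _hPre
  unfold Spec_default_ranking_py default_ranking_py default_ranking_py_alt
  have main : ∀ E : Option (List String),
      (results.foldl (pvStepA exclude_bad E) (none, none)).1
        = (match results.filter (pvPasses exclude_bad E) with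
           | [] => none
           | h :: t => (h :: t).find? (fun r => pvKey r == t.foldl (fun a r => max a (pvKey r)) (pvKey h))) := by
    intro E
    rw [← foldB_alt]
    have h := loop_inv exclude_bad E results none
    simp only [Option.map_none] at h
    rw [h]
  cases sub_exts with
  | none => exact main none
  | some l => exact main (some (l.map PySem.Str.lower))
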